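-- pv_equiv track=rewrite | github.com/Bharath-kolekar/cogone | backend/app/services/ai_agent_maximum_consistency_service.py | _detect_conceptual_contradictions
-- ===== SOURCE A (Python) =====
-- def _detect_conceptual_contradictions(prompt_concepts: set, response_concepts: set) -> bool:
--     """Detect conceptual contradictions"""
--     # Simple conceptual contradiction detection
--     contradiction_pairs = [
--         ("old", "new"), ("traditional", "modern"), ("classical", "contemporary"),
--         ("basic", "advanced"), ("simple", "complex"), ("easy", "difficult")
--     ]
--
--     for pair in contradiction_pairs:
--         if pair[0] in prompt_concepts and pair[1] in response_concepts:
--             return True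
--         if pair[1] in prompt_concepts and pair[0] in response_concepts:
--             return True
--
--     return False
-- ===== SOURCE B (Python) =====
-- _OPPOSITES = {
--     "old": "new", "new": "old",
--     "traditional": "modern", "modern": "traditional",
--     "classical": "contemporary", "contemporary": "classical",
--     "basic": "advanced", "advanced": "basic",
--     "simple": "complex", "complex": "simple",
--     "easy": "difficult", "difficult": "easy",
-- }
--
--
-- def _detect_conceptual_contradictions(prompt_concepts: set, response_concepts: set) -> bool:
--     """Detect conceptual contradictions"""
--     return any(_OPPOSITES.get(c) in response_concepts for c in prompt_concepts)
-- ===== Notes on version B (the rewrite author's own statement) =====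
-- stated objective: idiomatic
-- what changed: Replaces the double-direction scan over a fixed pair list with a single pass over the input set consulting a precomputed bidirectional antonym table via any(...).
import Mathlib
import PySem

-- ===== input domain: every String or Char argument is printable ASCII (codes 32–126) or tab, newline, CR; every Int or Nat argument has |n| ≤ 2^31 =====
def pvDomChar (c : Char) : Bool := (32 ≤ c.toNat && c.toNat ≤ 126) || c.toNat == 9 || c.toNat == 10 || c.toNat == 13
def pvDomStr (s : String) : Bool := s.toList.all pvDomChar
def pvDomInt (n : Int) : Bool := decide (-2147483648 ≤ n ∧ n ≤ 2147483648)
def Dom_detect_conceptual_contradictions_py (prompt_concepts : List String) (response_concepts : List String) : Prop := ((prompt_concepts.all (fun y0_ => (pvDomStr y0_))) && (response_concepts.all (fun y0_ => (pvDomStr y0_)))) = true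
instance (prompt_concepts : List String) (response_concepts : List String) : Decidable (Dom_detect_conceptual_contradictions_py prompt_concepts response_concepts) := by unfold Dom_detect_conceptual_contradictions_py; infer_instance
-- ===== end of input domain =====

-- B replaces A's two-direction scan over a fixed list of contradiction pairs by a single pass
-- over prompt_concepts consulting a precomputed bidirectional antonym dictionary (idiomatic any(...)).
-- Python sets are modelled as lists of their distinct elements; the result is order-independent.

-- ===== PORT A =====
def pvPairs : List (String × String) :=
  [("old", "new"), ("traditional", "modern"), ("classical", "contemporary"),
   ("basic", "advanced"), ("simple", "complex"), ("easy", "difficult")]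

def pvLoopA : List (String × String) → List String → List String → Bool
  | [], _, _ => false
  | p :: rest, P, R =>
    if P.contains p.1 && R.contains p.2 then true
    else if P.contains p.2 && R.contains p.1 then true
    else pvLoopA rest P R

def detect_conceptual_contradictions_py (prompt_concepts : List String) (response_concepts : List String) : Bool :=
  pvLoopA pvPairs prompt_concepts response_concepts

-- ===== PORT B =====
def pvOpp : PySem.Dict String String :=
  PySem.Dict.ofList
    [("old", "new"), ("new", "old"),
     ("traditional", "modern"), ("modern", "traditional"),
     ("classical", "contemporary"), ("contemporary", "classical"),
     ("basic", "advanced"), ("advanced", "basic"),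
     ("simple", "complex"), ("complex", "simple"),
     ("easy", "difficult"), ("difficult", "easy")]

def detect_conceptual_contradictions_py_alt (prompt_concepts : List String) (response_concepts : List String) : Bool :=
  prompt_concepts.any (fun c => match pvOpp.get? c with
    | some o => response_concepts.contains o
    | none => false)


-- ===== PRECONDITION & SPEC =====
def Spec_detect_conceptual_contradictions_py (prompt_concepts : List String) (response_concepts : List String) (out : Bool) : Prop := out = detect_conceptual_contradictions_py_alt prompt_concepts response_concepts
instance (prompt_concepts : List String) (response_concepts : List String) (out : Bool) : Decidable (Spec_detect_conceptual_contradictions_py prompt_concepts response_concepts out) := by unfold Spec_detect_conceptual_contradictions_py; infer_instance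

-- ===== CLAIM (what is proved, stated in full; the proofs are below) =====
def Claim_equal_detect_conceptual_contradictions_py : Prop := ∀ (prompt_concepts : List String) (response_concepts : List String), Dom_detect_conceptual_contradictions_py prompt_concepts response_concepts → Spec_detect_conceptual_contradictions_py prompt_concepts response_concepts (detect_conceptual_contradictions_py prompt_concepts response_concepts)

-- ===== LEMMAS AND PROOFS =====
def bigOr (P R : List String) : Bool :=
  (P.contains "old" && R.contains "new") || (P.contains "new" && R.contains "old") ||
  (P.contains "traditional" && R.contains "modern") || (P.contains "modern" && R.contains "traditional") ||
  (P.contains "classical" && R.contains "contemporary") || (P.contains "contemporary" && R.contains "classical") ||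
  (P.contains "basic" && R.contains "advanced") || (P.contains "advanced" && R.contains "basic") ||
  (P.contains "simple" && R.contains "complex") || (P.contains "complex" && R.contains "simple") ||
  (P.contains "easy" && R.contains "difficult") || (P.contains "difficult" && R.contains "easy")

theorem A_eq (P R : List String) : detect_conceptual_contradictions_py P R = bigOr P R := by
  simp [detect_conceptual_contradictions_py, pvLoopA, pvPairs, bigOr, Bool.if_true_left, Bool.or_assoc]


def pvOppItems : List (String × String) :=
  [("old", "new"), ("new", "old"),
   ("traditional", "modern"), ("modern", "traditional"),
   ("classical", "contemporary"), ("contemporary", "classical"),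
   ("basic", "advanced"), ("advanced", "basic"),
   ("simple", "complex"), ("complex", "simple"),
   ("easy", "difficult"), ("difficult", "easy")]

theorem pvOpp_items : pvOpp.items = pvOppItems := by decide

theorem f_eq (c : String) (R : List String) :
    (match pvOpp.get? c with | some o => R.contains o | none => false) =
    ((c == "old") && R.contains "new" || (c == "new") && R.contains "old" ||
     (c == "traditional") && R.contains "modern" || (c == "modern") && R.contains "traditional" ||
     (c == "classical") && R.contains "contemporary" || (c == "contemporary") && R.contains "classical" ||
     (c == "basic") && R.contains "advanced" || (c == "advanced") && R.contains "basic" ||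
     (c == "simple") && R.contains "complex" || (c == "complex") && R.contains "simple" ||
     (c == "easy") && R.contains "difficult" || (c == "difficult") && R.contains "easy") := by
  by_cases h1 : c = "old"
  · subst h1; rw [show pvOpp.get? "old" = some "new" from rfl]; simp
  by_cases h2 : c = "new"
  · subst h2; rw [show pvOpp.get? "new" = some "old" from rfl]; simp
  by_cases h3 : c = "traditional"
  · subst h3; rw [show pvOpp.get? "traditional" = some "modern" from rfl]; simp
  by_cases h4 : c = "modern"
  · subst h4; rw [show pvOpp.get? "modern" = some "traditional" from rfl]; simp
  by_cases h5 : c = "classical"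
  · subst h5; rw [show pvOpp.get? "classical" = some "contemporary" from rfl]; simp
  by_cases h6 : c = "contemporary"
  · subst h6; rw [show pvOpp.get? "contemporary" = some "classical" from rfl]; simp
  by_cases h7 : c = "basic"
  · subst h7; rw [show pvOpp.get? "basic" = some "advanced" from rfl]; simp
  by_cases h8 : c = "advanced"
  · subst h8; rw [show pvOpp.get? "advanced" = some "basic" from rfl]; simp
  by_cases h9 : c = "simple"
  · subst h9; rw [show pvOpp.get? "simple" = some "complex" from rfl]; simp
  by_cases h10 : c = "complex"
  · subst h10; rw [show pvOpp.get? "complex" = some "simple" from rfl]; simp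
  by_cases h11 : c = "easy"
  · subst h11; rw [show pvOpp.get? "easy" = some "difficult" from rfl]; simp
  by_cases h12 : c = "difficult"
  · subst h12; rw [show pvOpp.get? "difficult" = some "easy" from rfl]; simp
  have e1 : ("old" == c) = false := beq_eq_false_iff_ne.mpr (Ne.symm h1)
  have e1' : (c == "old") = false := beq_eq_false_iff_ne.mpr h1
  have e2 : ("new" == c) = false := beq_eq_false_iff_ne.mpr (Ne.symm h2)
  have e2' : (c == "new") = false := beq_eq_false_iff_ne.mpr h2
  have e3 : ("traditional" == c) = false := beq_eq_false_iff_ne.mpr (Ne.symm h3)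
  have e3' : (c == "traditional") = false := beq_eq_false_iff_ne.mpr h3
  have e4 : ("modern" == c) = false := beq_eq_false_iff_ne.mpr (Ne.symm h4)
  have e4' : (c == "modern") = false := beq_eq_false_iff_ne.mpr h4
  have e5 : ("classical" == c) = false := beq_eq_false_iff_ne.mpr (Ne.symm h5)
  have e5' : (c == "classical") = false := beq_eq_false_iff_ne.mpr h5
  have e6 : ("contemporary" == c) = false := beq_eq_false_iff_ne.mpr (Ne.symm h6)
  have e6' : (c == "contemporary") = false := beq_eq_false_iff_ne.mpr h6
  have e7 : ("basic" == c) = false := beq_eq_false_iff_ne.mpr (Ne.symm h7)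
  have e7' : (c == "basic") = false := beq_eq_false_iff_ne.mpr h7
  have e8 : ("advanced" == c) = false := beq_eq_false_iff_ne.mpr (Ne.symm h8)
  have e8' : (c == "advanced") = false := beq_eq_false_iff_ne.mpr h8
  have e9 : ("simple" == c) = false := beq_eq_false_iff_ne.mpr (Ne.symm h9)
  have e9' : (c == "simple") = false := beq_eq_false_iff_ne.mpr h9
  have e10 : ("complex" == c) = false := beq_eq_false_iff_ne.mpr (Ne.symm h10)
  have e10' : (c == "complex") = false := beq_eq_false_iff_ne.mpr h10
  have e11 : ("easy" == c) = false := beq_eq_false_iff_ne.mpr (Ne.symm h11)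
  have e11' : (c == "easy") = false := beq_eq_false_iff_ne.mpr h11
  have e12 : ("difficult" == c) = false := beq_eq_false_iff_ne.mpr (Ne.symm h12)
  have e12' : (c == "difficult") = false := beq_eq_false_iff_ne.mpr h12
  simp only [PySem.Dict.get?, pvOpp_items, pvOppItems, List.find?, e1, e1', e2, e2', e3, e3', e4, e4', e5, e5', e6, e6', e7, e7', e8, e8', e9, e9', e10, e10', e11, e11', e12, e12', Option.map]
  simp

theorem B_eq (P R : List String) : detect_conceptual_contradictions_py_alt P R = bigOr P R := by
  rw [Bool.eq_iff_iff]
  simp only [detect_conceptual_contradictions_py_alt, List.any_eq_true]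
  constructor
  · rintro ⟨x, hx, hfx⟩
    rw [f_eq] at hfx
    simp only [Bool.or_eq_true, Bool.and_eq_true, beq_iff_eq, List.contains_iff_mem] at hfx
    simp only [bigOr, Bool.or_eq_true, Bool.and_eq_true, List.contains_iff_mem]
    rcases hfx with (((((((((((⟨rfl,h⟩|⟨rfl,h⟩)|⟨rfl,h⟩)|⟨rfl,h⟩)|⟨rfl,h⟩)|⟨rfl,h⟩)|⟨rfl,h⟩)|⟨rfl,h⟩)|⟨rfl,h⟩)|⟨rfl,h⟩)|⟨rfl,h⟩)|⟨rfl,h⟩)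
    · exact Or.inl (Or.inl (Or.inl (Or.inl (Or.inl (Or.inl (Or.inl (Or.inl (Or.inl (Or.inl (Or.inl (⟨hx, h⟩)))))))))))
    · exact Or.inl (Or.inl (Or.inl (Or.inl (Or.inl (Or.inl (Or.inl (Or.inl (Or.inl (Or.inl (Or.inr ⟨hx, h⟩))))))))))
    · exact Or.inl (Or.inl (Or.inl (Or.inl (Or.inl (Or.inl (Or.inl (Or.inl (Or.inl (Or.inr ⟨hx, h⟩)))))))))
    · exact Or.inl (Or.inl (Or.inl (Or.inl (Or.inl (Or.inl (Or.inl (Or.inl (Or.inr ⟨hx, h⟩))))))))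
    · exact Or.inl (Or.inl (Or.inl (Or.inl (Or.inl (Or.inl (Or.inl (Or.inr ⟨hx, h⟩)))))))
    · exact Or.inl (Or.inl (Or.inl (Or.inl (Or.inl (Or.inl (Or.inr ⟨hx, h⟩))))))
    · exact Or.inl (Or.inl (Or.inl (Or.inl (Or.inl (Or.inr ⟨hx, h⟩)))))
    · exact Or.inl (Or.inl (Or.inl (Or.inl (Or.inr ⟨hx, h⟩))))
    · exact Or.inl (Or.inl (Or.inl (Or.inr ⟨hx, h⟩)))
    · exact Or.inl (Or.inl (Or.inr ⟨hx, h⟩))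
    · exact Or.inl (Or.inr ⟨hx, h⟩)
    · exact Or.inr ⟨hx, h⟩
  · intro h
    simp only [bigOr, Bool.or_eq_true, Bool.and_eq_true, List.contains_iff_mem] at h
    rcases h with (((((((((((⟨hp,hr⟩|⟨hp,hr⟩)|⟨hp,hr⟩)|⟨hp,hr⟩)|⟨hp,hr⟩)|⟨hp,hr⟩)|⟨hp,hr⟩)|⟨hp,hr⟩)|⟨hp,hr⟩)|⟨hp,hr⟩)|⟨hp,hr⟩)|⟨hp,hr⟩)
    · exact ⟨"old", hp, by rw [f_eq]; simp [hr]⟩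
    · exact ⟨"new", hp, by rw [f_eq]; simp [hr]⟩
    · exact ⟨"traditional", hp, by rw [f_eq]; simp [hr]⟩
    · exact ⟨"modern", hp, by rw [f_eq]; simp [hr]⟩
    · exact ⟨"classical", hp, by rw [f_eq]; simp [hr]⟩
    · exact ⟨"contemporary", hp, by rw [f_eq]; simp [hr]⟩
    · exact ⟨"basic", hp, by rw [f_eq]; simp [hr]⟩
    · exact ⟨"advanced", hp, by rw [f_eq]; simp [hr]⟩
    · exact ⟨"simple", hp, by rw [f_eq]; simp [hr]⟩
    · exact ⟨"complex", hp, by rw [f_eq]; simp [hr]⟩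
    · exact ⟨"easy", hp, by rw [f_eq]; simp [hr]⟩
    · exact ⟨"difficult", hp, by rw [f_eq]; simp [hr]⟩



-- ===== VERDICT (by name: the statement is the Claim_ definition above) =====
theorem detect_conceptual_contradictions_py_spec : Claim_equal_detect_conceptual_contradictions_py := by
  intro P R _
  unfold Spec_detect_conceptual_contradictions_py
  rw [A_eq, B_eq]
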